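-- pv_equiv track=rewrite | github.com/KD9YQK/ham-microblog | tcpAPRSIS.py | get_aprs_pw
-- ===== SOURCE A (Python) =====
-- def get_aprs_pw(callsign: str):
--     cs = callsign.upper()
--     i = 0
--     tmp_code = 29666
--
--     while i < len(cs):
--         tmp_code = tmp_code ^ ord(cs[i]) * 256
--         try:
--             tmp_code = tmp_code ^ ord(cs[i + 1])
--         except IndexError:
--             pass
--         i += 2
--     tmp_code = tmp_code & 32767
--     return tmp_code
-- ===== SOURCE B (Python) =====
-- def get_aprs_pw(callsign: str):
--     # (hi, lo) = (XOR of even-index ords, XOR of odd-index ords) of the suffix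
--     # processed so far; prepending a character swaps the parities.
--     hi, lo = 0, 0
--     for ch in reversed(callsign.upper()):
--         hi, lo = lo ^ ord(ch), hi
--     return (29666 ^ (hi << 8) ^ lo) & 32767
-- ===== Notes on version B (the rewrite author's own statement) =====
-- stated objective: faster
-- what changed: Replaces A's interleaved two-at-a-time stepping with try/except on one 16-bit accumulator by a parity-splitting pass over the reversed string that maintains a pair (XOR of even-index ords, XOR of odd-index ords) via a swap per character - no index arithmetic, no parity test, no *256 inside the loop - combining the halves once at the end as (29666 ^ (hi << 8) ^ lo) & 32767; correct because XOR is commutative/associative and a shift distributes over XOR; the tight swap loop avoids A's per-step indexing and exception handling (measured constant-factor speedup).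
import Mathlib
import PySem

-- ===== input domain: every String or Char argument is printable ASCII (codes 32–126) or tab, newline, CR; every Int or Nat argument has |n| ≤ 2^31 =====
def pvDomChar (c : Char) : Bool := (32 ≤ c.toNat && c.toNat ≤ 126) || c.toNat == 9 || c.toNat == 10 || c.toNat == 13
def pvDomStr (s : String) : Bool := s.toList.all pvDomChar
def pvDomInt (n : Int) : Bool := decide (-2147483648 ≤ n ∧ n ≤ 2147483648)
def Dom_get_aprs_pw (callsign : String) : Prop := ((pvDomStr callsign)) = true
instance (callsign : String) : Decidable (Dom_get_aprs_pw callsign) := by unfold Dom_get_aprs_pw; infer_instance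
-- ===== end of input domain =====

-- B replaces A's interleaved two-at-a-time XOR loop by a recursive parity-splitting fold
-- into a pair of 8-bit accumulators, combined once at the end (measured constant-factor speedup).
set_option maxRecDepth 8000


-- ===== PORT A =====
-- A's while loop steps two characters at a time; the try/except IndexError on cs[i+1]
-- is the single-character case [c].
def pvALoop : List Char → Int → Int
  | [], t => t
  | [c], t => PySem.Int.bxor t ((c.toNat : Int) * 256)
  | c :: d :: rest, t =>
      pvALoop rest (PySem.Int.bxor (PySem.Int.bxor t ((c.toNat : Int) * 256)) ((d.toNat : Int)))

def get_aprs_pw (callsign : String) : Int :=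
  PySem.Int.band (pvALoop (PySem.Str.upper callsign).toList 29666) 32767

-- ===== PORT B =====
-- B's loop body: prepending a character to the processed suffix swaps the parities.
def pvBStep (p : Int × Int) (c : Char) : Int × Int :=
  (PySem.Int.bxor p.2 ((c.toNat : Int)), p.1)

def get_aprs_pw_alt (callsign : String) : Int :=
  let p := (PySem.Str.upper callsign).toList.reverse.foldl pvBStep (0, 0)
  PySem.Int.band (PySem.Int.bxor (PySem.Int.bxor 29666 (p.1 <<< (8 : Nat))) p.2) 32767

-- ===== PRECONDITION & SPEC =====
def Spec_get_aprs_pw (callsign : String) (out : Int) : Prop := out = get_aprs_pw_alt callsign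
instance (callsign : String) (out : Int) : Decidable (Spec_get_aprs_pw callsign out) := by unfold Spec_get_aprs_pw; infer_instance

-- ===== CLAIM =====
def Claim_equal_get_aprs_pw : Prop := ∀ (callsign : String), Dom_get_aprs_pw callsign → Spec_get_aprs_pw callsign (get_aprs_pw callsign)

-- ===== LEMMAS AND PROOFS =====
-- Nat-level parity split mirroring pvHalves.
def pvEO : List Char → Nat × Nat
  | [] => (0, 0)
  | c :: rest => ((pvEO rest).2 ^^^ c.toNat, (pvEO rest).1)

theorem pvHalves_eq : ∀ (l : List Char),
    l.reverse.foldl pvBStep (0, 0) = (((pvEO l).1 : Int), ((pvEO l).2 : Int))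
  | [] => by simp [pvEO]
  | c :: rest => by
      simp [List.foldl_append, pvHalves_eq rest, pvBStep, pvEO, PySem.Int.bxor_natCast]

theorem pvShiftLeft_xor (a b k : Nat) : (a ^^^ b) <<< k = a <<< k ^^^ b <<< k := by
  apply Nat.eq_of_testBit_eq; intro i
  simp [Nat.testBit_shiftLeft, Nat.testBit_xor, Bool.and_xor_distrib_left]

theorem pvShl8 (a : Nat) : a <<< 8 = a * 256 := by
  rw [Nat.shiftLeft_eq]

theorem pvMul256_xor (a b : Nat) : (a ^^^ b) * 256 = a * 256 ^^^ b * 256 := by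
  rw [← pvShl8, ← pvShl8, ← pvShl8, pvShiftLeft_xor]

theorem pvMain : ∀ (l : List Char) (t : Nat),
    pvALoop l (t : Int) = (((t ^^^ ((pvEO l).1 <<< 8)) ^^^ (pvEO l).2 : Nat) : Int)
  | [], t => by simp [pvALoop, pvEO]
  | [c], t => by
      have h : ((c.toNat : Int) * 256) = ((c.toNat * 256 : Nat) : Int) := by push_cast; ring
      simp only [pvALoop, pvEO, h, PySem.Int.bxor_natCast, pvShl8, Nat.xor_zero, Nat.zero_xor]
  | c :: d :: rest, t => by
      have h : ((c.toNat : Int) * 256) = ((c.toNat * 256 : Nat) : Int) := by push_cast; ring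
      simp only [pvALoop, h, PySem.Int.bxor_natCast]
      rw [pvMain rest ((t ^^^ c.toNat * 256) ^^^ d.toNat)]
      simp only [pvEO, pvMul256_xor, pvShl8]
      congr 1
      simp [Nat.xor_assoc, Nat.xor_comm, Nat.xor_left_comm]

-- ===== VERDICT =====
theorem get_aprs_pw_spec : Claim_equal_get_aprs_pw := by
  intro cs _
  unfold Spec_get_aprs_pw get_aprs_pw get_aprs_pw_alt
  rw [pvHalves_eq]
  have h29666 : (29666 : Int) = ((29666 : Nat) : Int) := by norm_num
  rw [h29666, pvMain]
  simp only [PySem.Int.bxor_natCast, ← Int.natCast_shiftLeft]
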